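-- pv_equiv track=rewrite | github.com/tobigrimm/adventofcode2020 | day11/day11.py | print_nice_map
-- ===== SOURCE A (Python) =====
-- def print_nice_map(seatmap):
--     result = ""
--     for row in range(0,100):
--         for col in range(0,100):
--             if (row, col) in seatmap:
--                 result += str(seatmap[(row, col)])
--         if (row, 0) in seatmap:
--             result += "\n"
--     return result
-- ===== SOURCE B (Python) =====
-- def print_nice_map(seatmap):
--     # Group the in-box entries by row, then emit rows/cols in ascending order:
--     # traverses the actual entries instead of probing all 100x100 cells.
--     rows = {}
--     for (r, c), v in seatmap.items():
--         if 0 <= r < 100 and 0 <= c < 100: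
--             rows.setdefault(r, []).append((c, v))
--     out = []
--     for r in sorted(rows):
--         cells = sorted(rows[r], key=lambda cell: cell[0])
--         for c, v in cells:
--             out.append(str(v))
--         if cells[0][0] == 0:
--             out.append("\n")
--     return "".join(out)
-- ===== Notes on version B (the rewrite author's own statement) =====
-- stated objective: faster
-- what changed: Instead of probing all 100x100 grid cells with dict lookups, B groups the dict's own in-box entries by row in one pass and emits the present rows and columns in sorted order.
import Mathlib
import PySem

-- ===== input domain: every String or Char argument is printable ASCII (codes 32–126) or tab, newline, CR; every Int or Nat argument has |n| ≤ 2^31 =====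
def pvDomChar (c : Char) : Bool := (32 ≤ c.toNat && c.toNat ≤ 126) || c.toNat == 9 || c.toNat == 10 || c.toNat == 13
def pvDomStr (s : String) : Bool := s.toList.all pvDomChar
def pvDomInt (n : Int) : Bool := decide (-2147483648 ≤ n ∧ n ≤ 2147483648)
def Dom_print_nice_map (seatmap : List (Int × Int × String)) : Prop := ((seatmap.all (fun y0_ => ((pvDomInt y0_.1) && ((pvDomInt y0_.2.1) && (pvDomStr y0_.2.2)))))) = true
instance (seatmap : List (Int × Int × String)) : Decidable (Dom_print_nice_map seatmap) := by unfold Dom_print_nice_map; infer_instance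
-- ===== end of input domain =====

-- B renders the seatmap by grouping the dict's own in-box entries by row and emitting the
-- present rows/columns in ascending order, instead of probing every cell of a 100×100 grid.

-- the dict argument: the Python caller passes a dict {(row, col): v}; both ports receive it
-- as an association list and rebuild the same dict from it
def pvKeyed (seatmap : List (Int × Int × String)) : List ((Int × Int) × String) :=
  seatmap.map (fun p => ((p.1, p.2.1), p.2.2))


-- ===== PORT A =====
def print_nice_map (seatmap : List (Int × Int × String)) : String :=
  let d : PySem.Dict (Int × Int) String := PySem.Dict.ofList (pvKeyed seatmap)
  (PySem.List.pyRange 0 100).foldl (fun result row =>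
    let result1 := (PySem.List.pyRange 0 100).foldl (fun res col =>
      if d.contains (row, col) then res ++ d.getD (row, col) "" else res) result
    if d.contains (row, 0) then result1 ++ "\n" else result1) ""


-- ===== PORT B =====
def pvInBox (k : Int × Int) : Bool :=
  decide (0 ≤ k.1) && decide (k.1 < 100) && decide (0 ≤ k.2) && decide (k.2 < 100)

def print_nice_map_alt (seatmap : List (Int × Int × String)) : String :=
  let d : PySem.Dict (Int × Int) String := PySem.Dict.ofList (pvKeyed seatmap)
  let rows : PySem.Dict Int (List (Int × String)) :=
    d.items.foldl (fun rows p =>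
      if pvInBox p.1 then rows.modify p.1.1 [] (fun cs => cs ++ [(p.1.2, p.2)]) else rows)
      PySem.Dict.empty
  let out : List String :=
    (PySem.List.sorted rows.keys (fun r => r)).foldl (fun out r =>
      let cells := PySem.List.sorted (rows.getD r []) (fun cell => cell.1)
      let out1 := cells.foldl (fun acc cv => acc ++ [cv.2]) out
      if (PySem.List.pyGetD cells 0 (-1, "")).1 == 0 then out1 ++ ["\n"] else out1) []
  PySem.Str.join "" out


-- ===== PRECONDITION & SPEC =====
def Spec_print_nice_map (seatmap : List (Int × Int × String)) (out : String) : Prop := out = print_nice_map_alt seatmap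
instance (seatmap : List (Int × Int × String)) (out : String) : Decidable (Spec_print_nice_map seatmap out) := by unfold Spec_print_nice_map; infer_instance

-- ===== CLAIM (what is proved, stated in full; the proofs are below) =====
def Claim_equal_print_nice_map : Prop := ∀ (seatmap : List (Int × Int × String)), Dom_print_nice_map seatmap → Spec_print_nice_map seatmap (print_nice_map seatmap)

-- ===== LEMMAS AND PROOFS =====

def pvRows (d : PySem.Dict (Int × Int) String) : PySem.Dict Int (List (Int × String)) :=
  d.items.foldl (fun rows p =>
    if pvInBox p.1 then rows.modify p.1.1 [] (fun cs => cs ++ [(p.1.2, p.2)]) else rows)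
    PySem.Dict.empty
theorem pvRows_eq_shape (d : PySem.Dict (Int × Int) String) :
    pvRows d = ((d.items.filter (fun p => pvInBox p.1)).map
        (fun p => (p.1.1, (p.1.2, p.2)))).foldl
      (fun rows q => rows.modify q.1 [] (fun cs => cs ++ [q.2])) PySem.Dict.empty := by
  unfold pvRows
  rw [List.foldl_map, List.foldl_filter]
theorem pvRows_getD (d : PySem.Dict (Int × Int) String) (r : Int) :
    (pvRows d).getD r [] =
      (d.items.filter (fun p => pvInBox p.1 && p.1.1 == r)).map (fun p => (p.1.2, p.2)) := by
  rw [pvRows_eq_shape, PySem.Dict.getD_foldl_modify_append]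
  simp only [List.filter_map, Function.comp_def, List.filter_filter, List.map_map,
    PySem.Dict.getD_empty]
  rw [List.filter_congr (fun a _ => by rw [Bool.and_comm])]
  simp
theorem pvRows_mem_keys (d : PySem.Dict (Int × Int) String) (r : Int) :
    r ∈ (pvRows d).keys ↔ ∃ p ∈ d.items, pvInBox p.1 ∧ p.1.1 = r := by
  rw [pvRows_eq_shape]
  rw [PySem.Dict.keys_foldl_modify_key _ (fun (q : Int × (Int × String)) => q.1) []
    (fun _ q cs => cs ++ [q.2])]
  simp only [PySem.Set.mem_update, PySem.Dict.keys_empty]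
  simp [List.mem_filter]

def pvYs (d : PySem.Dict (Int × Int) String) (r : Int) : List (Int × String) :=
  ((PySem.List.pyRange 0 100).filter (fun c => d.contains (r, c))).map (fun c => (c, d.getD (r, c) ""))

theorem pvRows_keys_bounds (d : PySem.Dict (Int × Int) String) (r : Int)
    (h : r ∈ (pvRows d).keys) : 0 ≤ r ∧ r < 100 := by
  rw [pvRows_mem_keys] at h
  obtain ⟨p, _, hbox, hr⟩ := h
  simp only [pvInBox, Bool.and_eq_true, decide_eq_true_eq] at hbox
  omega

theorem pvYs_ne_nil (d : PySem.Dict (Int × Int) String) (r : Int)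
    (h : r ∈ (pvRows d).keys) : pvYs d r ≠ [] := by
  rw [pvRows_mem_keys] at h
  obtain ⟨p, hmem, hbox, hr⟩ := h
  simp only [pvInBox, Bool.and_eq_true, decide_eq_true_eq] at hbox
  have hc : p.1.2 ∈ (PySem.List.pyRange 0 100).filter (fun c => d.contains (r, c)) := by
    rw [List.mem_filter]
    refine ⟨PySem.List.mem_pyRange_one.mpr ⟨by omega, by omega⟩, ?_⟩
    rw [PySem.Dict.contains_iff_mem_keys]
    have : p.1 ∈ d.items.map Prod.fst := List.mem_map_of_mem hmem
    simpa [PySem.Dict.keys, ← hr] using this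
  intro hnil
  unfold pvYs at hnil
  rw [List.map_eq_nil_iff] at hnil
  rw [hnil] at hc
  exact (List.not_mem_nil) hc
theorem pvRange_eq : PySem.List.pyRange 0 100 = List.map (fun k : Nat => (k : Int)) (List.range 100) := by
  have := PySem.List.pyRange_zero_natCast 100
  simpa using this

theorem pvRange_pairwise : (PySem.List.pyRange 0 100).Pairwise (· < ·) := by
  rw [pvRange_eq]
  refine List.Pairwise.map _ (fun a b h => by exact_mod_cast h) ?_
  exact List.pairwise_lt_range

theorem pvRange_nodup : (PySem.List.pyRange 0 100).Nodup := pvRange_pairwise.nodup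

theorem pvItems_nodup (d : PySem.Dict (Int × Int) String) (hn : d.keys.Nodup) : d.items.Nodup := by
  have : (d.items.map Prod.fst).Nodup := by simpa [PySem.Dict.keys] using hn
  exact this.of_map

theorem pvMem_cells (d : PySem.Dict (Int × Int) String) (hn : d.keys.Nodup) (r : Int)
    (hr : 0 ≤ r ∧ r < 100) (z : Int × String) :
    z ∈ (pvRows d).getD r [] ↔ z ∈ pvYs d r := by
  rw [pvRows_getD]
  unfold pvYs
  simp only [List.mem_map, List.mem_filter, Bool.and_eq_true, beq_iff_eq]
  constructor
  · rintro ⟨p, ⟨hmem, hbox, hfst⟩, hz⟩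
    simp only [pvInBox, Bool.and_eq_true, decide_eq_true_eq] at hbox
    refine ⟨p.1.2, ⟨PySem.List.mem_pyRange_one.mpr ⟨by omega, by omega⟩, ?_⟩, ?_⟩
    · rw [PySem.Dict.contains_iff_mem_keys]
      have : p.1 ∈ d.items.map Prod.fst := List.mem_map_of_mem hmem
      have h1 : p.1 = (r, p.1.2) := by rw [← hfst]
      rw [← h1]
      simpa [PySem.Dict.keys] using this
    · have h1 : ((r, p.1.2), p.2) ∈ d.items := by
        have : p.1 = (r, p.1.2) := by rw [← hfst]
        rw [← this]; exact hmem
      rw [PySem.Dict.getD_of_mem_items d h1 hn ""]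
      exact hz
  · rintro ⟨c, ⟨hcr, hcont⟩, hz⟩
    rw [PySem.List.mem_pyRange_one] at hcr
    have hsome : ∃ v, d.get? (r, c) = some v := by
      cases hv : d.get? (r, c) with
      | none => rw [PySem.Dict.get?_eq_none_iff_contains] at hv; rw [hv] at hcont; cases hcont
      | some v => exact ⟨v, rfl⟩
    obtain ⟨v, hv⟩ := hsome
    have hmem : ((r, c), v) ∈ d.items := PySem.Dict.mem_items_of_get?_eq_some _ hv
    refine ⟨((r, c), v), ⟨hmem, ?_, rfl⟩, ?_⟩
    · simp only [pvInBox, Bool.and_eq_true, decide_eq_true_eq]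
      omega
    · rw [← hz]
      simp [PySem.Dict.getD_of_mem_items d hmem hn ""]

theorem pvCells_nodup (d : PySem.Dict (Int × Int) String) (hn : d.keys.Nodup) (r : Int) :
    ((pvRows d).getD r []).Nodup := by
  rw [pvRows_getD]
  have hfil : (d.items.filter (fun p => pvInBox p.1 && p.1.1 == r)).Nodup :=
    (pvItems_nodup d hn).filter _
  refine List.Nodup.map_on ?_ hfil
  intro x hx y hy hxy
  rw [List.mem_filter] at hx hy
  have hkeys : (d.items.map Prod.fst).Nodup := by simpa [PySem.Dict.keys] using hn
  have hxr : x.1.1 = r := by simpa using (Bool.and_elim_right hx.2)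
  have hyr : y.1.1 = r := by simpa using (Bool.and_elim_right hy.2)
  have hk : x.1 = y.1 := by
    have h2 : x.1.2 = y.1.2 := congrArg Prod.fst hxy
    exact Prod.ext (hxr.trans hyr.symm) h2
  have := List.inj_on_of_nodup_map hkeys hx.1 hy.1 hk
  exact this

theorem pvYs_nodup (d : PySem.Dict (Int × Int) String) (r : Int) : (pvYs d r).Nodup := by
  unfold pvYs
  refine List.Nodup.map_on ?_ (pvRange_nodup.filter _)
  intro x _ y _ hxy
  exact congrArg Prod.fst hxy

theorem pvYs_pairwise (d : PySem.Dict (Int × Int) String) (r : Int) :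
    (pvYs d r).Pairwise (fun a b => a.1 < b.1) := by
  unfold pvYs
  rw [List.pairwise_map]
  exact (pvRange_pairwise.filter _)

theorem pvSorted_cells (d : PySem.Dict (Int × Int) String) (hn : d.keys.Nodup) (r : Int)
    (hr : 0 ≤ r ∧ r < 100) :
    PySem.List.sorted ((pvRows d).getD r []) (fun cell => cell.1) = pvYs d r := by
  refine PySem.List.sorted_eq_of_perm_of_pairwise_lt _ _ _ ?_ (pvYs_pairwise d r)
  rw [List.perm_ext_iff_of_nodup (pvYs_nodup d r) (pvCells_nodup d hn r)]
  intro z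
  exact (pvMem_cells d hn r hr z).symm

theorem pvRows_keys_nodup (d : PySem.Dict (Int × Int) String) : (pvRows d).keys.Nodup := by
  rw [pvRows_eq_shape]
  exact PySem.Dict.nodup_keys_foldl_modify_key _ (fun (q : Int × (Int × String)) => q.1) []
    (fun _ q cs => cs ++ [q.2]) _
    (by simp [PySem.Dict.keys_empty])

theorem pvSorted_keys (d : PySem.Dict (Int × Int) String) :
    PySem.List.sorted (pvRows d).keys (fun r => r) =
      (PySem.List.pyRange 0 100).filter (fun r => decide (r ∈ (pvRows d).keys)) := by
  refine PySem.List.sorted_eq_of_perm_of_pairwise_lt _ _ _ ?_ (pvRange_pairwise.filter _)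
  rw [List.perm_ext_iff_of_nodup (pvRange_nodup.filter _) (pvRows_keys_nodup d)]
  intro r
  rw [List.mem_filter]
  simp only [decide_eq_true_eq]
  constructor
  · exact fun h => h.2
  · intro h
    have hb := pvRows_keys_bounds d r h
    exact ⟨PySem.List.mem_pyRange_one.mpr ⟨hb.1, hb.2⟩, h⟩

theorem pvYs_head (d : PySem.Dict (Int × Int) String) (r : Int) (hne : pvYs d r ≠ []) :
    ((PySem.List.pyGetD (pvYs d r) 0 (-1, "")).1 == 0) = d.contains (r, 0) := by
  have hcons : PySem.List.pyRange 0 100 = 0 :: PySem.List.pyRange 1 100 :=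
    PySem.List.pyRange_one_cons (by norm_num)
  unfold pvYs at hne ⊢
  rw [hcons] at hne ⊢
  cases hc : d.contains (r, 0) with
  | true =>
    simp only [List.filter_cons, hc, if_true, List.map_cons]
    simp [PySem.List.pyGetD, PySem.List.pyGet?, PySem.List.pyIdx?]
  | false =>
    simp only [List.filter_cons, hc, Bool.false_eq_true, if_false] at hne ⊢
    cases hfl : ((PySem.List.pyRange 1 100).filter (fun c => d.contains (r, c))).map
        (fun c => (c, d.getD (r, c) "")) with
    | nil => exact absurd hfl hne
    | cons z zs =>
      have hz : z ∈ ((PySem.List.pyRange 1 100).filter (fun c => d.contains (r, c))).map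
          (fun c => (c, d.getD (r, c) "")) := by rw [hfl]; exact List.mem_cons_self
      have hz1 : 1 ≤ z.1 := by
        rw [List.mem_map] at hz
        obtain ⟨c, hcmem, hzc⟩ := hz
        rw [List.mem_filter] at hcmem
        have := (PySem.List.mem_pyRange_one.mp hcmem.1).1
        rw [← hzc]
        exact this
      simp [PySem.List.pyGetD, PySem.List.pyGet?, PySem.List.pyIdx?]
      omega

def pvPieceA (d : PySem.Dict (Int × Int) String) (r : Int) : List Char :=
  (((PySem.List.pyRange 0 100).filter (fun c => d.contains (r, c))).map
    (fun c => (d.getD (r, c) "").toList)).flatten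
  ++ (if d.contains (r, 0) then ['\n'] else [])

def pvBPiece (d : PySem.Dict (Int × Int) String) (r : Int) : List String :=
  (PySem.List.sorted ((pvRows d).getD r []) (fun cell => cell.1)).map (fun cv => cv.2)
  ++ (if (PySem.List.pyGetD (PySem.List.sorted ((pvRows d).getD r []) (fun cell => cell.1)) 0
        (-1, "")).1 == 0 then ["\n"] else [])

theorem pvInnerFold (d : PySem.Dict (Int × Int) String) (r : Int) (l : List Int) (res : String) :
    (l.foldl (fun res col => if d.contains (r, col) then res ++ d.getD (r, col) "" else res)
      res).toList =
    res.toList ++ ((l.filter (fun c => d.contains (r, c))).map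
      (fun c => (d.getD (r, c) "").toList)).flatten := by
  induction l generalizing res with
  | nil => simp
  | cons c l ih =>
    simp only [List.foldl_cons, List.filter_cons]
    cases hc : d.contains (r, c) with
    | true => simp [ih, String.toList_append]
    | false => simp [ih]

theorem pvOuterFold (g : String → Int → String) (pieces : Int → List Char) (l : List Int)
    (h : ∀ res r, r ∈ l → (g res r).toList = res.toList ++ pieces r) (res : String) :
    (l.foldl g res).toList = res.toList ++ (l.map pieces).flatten := by
  induction l generalizing res with
  | nil => simp
  | cons r l ih =>
    simp only [List.foldl_cons, List.map_cons, List.flatten_cons]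
    rw [ih (fun res r hr => h res r (List.mem_cons_of_mem _ hr)), h res r List.mem_cons_self,
      List.append_assoc]

theorem pvBodyEq (d : PySem.Dict (Int × Int) String) (out : List String) (r : Int) :
    (let cells := PySem.List.sorted ((pvRows d).getD r []) (fun cell => cell.1)
     let out1 := cells.foldl (fun acc cv => acc ++ [cv.2]) out
     if (PySem.List.pyGetD cells 0 (-1, "")).1 == 0 then out1 ++ ["\n"] else out1) =
    out ++ pvBPiece d r := by
  simp only [PySem.List.foldl_append_singleton_eq_map, pvBPiece]
  split_ifs <;> simp [List.append_assoc]

theorem pvBFold (d : PySem.Dict (Int × Int) String) (l : List Int) (out : List String) :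
    (l.foldl (fun out r =>
      let cells := PySem.List.sorted ((pvRows d).getD r []) (fun cell => cell.1)
      let out1 := cells.foldl (fun acc cv => acc ++ [cv.2]) out
      if (PySem.List.pyGetD cells 0 (-1, "")).1 == 0 then out1 ++ ["\n"] else out1) out) =
    out ++ l.flatMap (pvBPiece d) := by
  rw [PySem.List.foldl_congr_mem l _ (fun out r => out ++ pvBPiece d r) out
    (fun out r _ => pvBodyEq d out r)]
  exact PySem.List.foldl_append_eq_flatMap _ _ _

theorem pvPieceEq (d : PySem.Dict (Int × Int) String) (hn : d.keys.Nodup) (r : Int)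
    (h : r ∈ (pvRows d).keys) :
    ((pvBPiece d r).map String.toList).flatten = pvPieceA d r := by
  have hb := pvRows_keys_bounds d r h
  unfold pvBPiece pvPieceA
  rw [pvSorted_cells d hn r hb, pvYs_head d r (pvYs_ne_nil d r h)]
  cases hc : d.contains (r, 0) <;>
    simp [pvYs, List.map_map, Function.comp_def]

theorem pvPieceA_nil (d : PySem.Dict (Int × Int) String) (r : Int)
    (hr : r ∈ PySem.List.pyRange 0 100) (h : r ∉ (pvRows d).keys) : pvPieceA d r = [] := by
  have hrb := PySem.List.mem_pyRange_one.mp hr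
  have hnc : ∀ c ∈ PySem.List.pyRange 0 100, d.contains (r, c) = false := by
    intro c hcmem
    have hcb := PySem.List.mem_pyRange_one.mp hcmem
    cases hcont : d.contains (r, c) with
    | false => rfl
    | true =>
      exfalso
      apply h
      rw [pvRows_mem_keys]
      rw [PySem.Dict.contains_iff_mem_keys] at hcont
      simp only [PySem.Dict.keys, List.mem_map] at hcont
      obtain ⟨p, hpmem, hp1⟩ := hcont
      refine ⟨p, hpmem, ?_, by rw [hp1]⟩
      simp only [pvInBox, Bool.and_eq_true, decide_eq_true_eq, hp1]
      omega
  unfold pvPieceA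
  rw [List.filter_eq_nil_iff.mpr (by intro c hc; simp [hnc c hc]),
    hnc 0 (PySem.List.mem_pyRange_one.mpr (by norm_num))]
  simp

theorem pvFlattenFilter (l : List Int) (p : Int → Bool) (f : Int → List Char)
    (h : ∀ r ∈ l, p r = false → f r = []) :
    (l.map f).flatten = ((l.filter p).map f).flatten := by
  induction l with
  | nil => rfl
  | cons r l ih =>
    simp only [List.map_cons, List.flatten_cons, List.filter_cons]
    cases hp : p r with
    | true => simp [ih (fun a ha hpa => h a (List.mem_cons_of_mem _ ha) hpa)]
    | false =>
      rw [h r List.mem_cons_self hp]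
      simp [ih (fun a ha hpa => h a (List.mem_cons_of_mem _ ha) hpa)]

theorem pvFlatten3 (ks : List Int) (bp : Int → List String) :
    ((ks.flatMap bp).map String.toList).flatten =
      (ks.map (fun r => ((bp r).map String.toList).flatten)).flatten := by
  induction ks with
  | nil => rfl
  | cons r ks ih => simp [List.flatMap_cons, ih]

theorem pvJoinNil (l : List String) :
    (PySem.Str.join "" l).toList = (l.map String.toList).flatten := by
  have h : ∀ xss : List (List Char), ([] : List Char).intercalate xss = xss.flatten := by
    intro xss
    induction xss with
    | nil => rfl
    | cons x xs ih =>
      cases xs with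
      | nil => simp [List.intercalate]
      | cons y ys => simp_all [List.intercalate, List.intersperse]
  simp [PySem.Str.join, PySem.Chars.join, h]

theorem pvMain (seatmap : List (Int × Int × String)) :
    print_nice_map seatmap = print_nice_map_alt seatmap := by
  rw [← String.toList_inj]
  set d : PySem.Dict (Int × Int) String := PySem.Dict.ofList (pvKeyed seatmap) with hd
  have hn : d.keys.Nodup := PySem.Dict.nodup_keys_ofList _
  have hrows : (pvRows d) = d.items.foldl (fun rows p =>
      if pvInBox p.1 then rows.modify p.1.1 [] (fun cs => cs ++ [(p.1.2, p.2)]) else rows)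
      PySem.Dict.empty := rfl
  -- A side
  have hA : (print_nice_map seatmap).toList = ((PySem.List.pyRange 0 100).map (pvPieceA d)).flatten := by
    simp only [print_nice_map]
    rw [← hd]
    rw [pvOuterFold _ (pvPieceA d) _ ?_ ""]
    · simp
    · intro res r _
      cases hc : d.contains (r, 0) with
      | true =>
        rw [if_pos rfl]
        rw [String.toList_append, pvInnerFold]
        simp [pvPieceA, hc, List.append_assoc]
      | false =>
        rw [if_neg (by simp)]
        rw [pvInnerFold]
        simp [pvPieceA, hc]
  -- B side
  have hB : (print_nice_map_alt seatmap).toList =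
      (((PySem.List.pyRange 0 100).filter (fun r => decide (r ∈ (pvRows d).keys))).map
        (fun r => ((pvBPiece d r).map String.toList).flatten)).flatten := by
    simp only [print_nice_map_alt]
    rw [← hd, ← hrows, pvBFold, pvSorted_keys, pvJoinNil]
    simp only [List.nil_append]
    rw [pvFlatten3]
  rw [hA, hB]
  rw [pvFlattenFilter _ (fun r => decide (r ∈ (pvRows d).keys)) _ ?_]
  · refine congrArg _ ?_
    refine (List.map_congr_left ?_).symm
    intro r hrmem
    rw [List.mem_filter] at hrmem
    exact pvPieceEq d hn r (by simpa using hrmem.2)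
  · intro r hrmem hpf
    exact pvPieceA_nil d r hrmem (by simpa using hpf)

-- ===== VERDICT (by name: the statement is the Claim_ definition above) =====
theorem print_nice_map_spec : Claim_equal_print_nice_map := by
  intro seatmap _
  unfold Spec_print_nice_map
  exact pvMain seatmap
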